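-- pv_equiv track=rewrite | github.com/crnhrv/AdventOfCode2022 | day23/solution.py | elf_in_any_direction
-- ===== SOURCE A (Python) =====
-- def get_new_elf_pos(elf, direction):
--     new_x = elf[0] + direction[0]
--     new_y = elf[1] + direction[1]
--     return (new_x, new_y)
--
-- def elf_in_any_direction(elf, directions, elves):
--     seen_directions = set()
--     for cardinal_directions in directions:
--         for direction in cardinal_directions:
--             if direction in seen_directions:
--                 continue
--             seen_directions.add(direction)
--             new_elf = get_new_elf_pos(elf, direction)
--             if new_elf in elves:
--                 return True
--
--     return False
-- ===== SOURCE B (Python) =====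
-- def elf_in_any_direction(elf, directions, elves):
--     # Inverted scan: instead of translating elf by each offset and probing elves,
--     # walk the elves and ask whether each one's displacement from elf is a known offset.
--     offsets = {d for group in directions for d in group}
--     ex, ey = elf
--     return any((e[0] - ex, e[1] - ey) in offsets for e in elves)
-- ===== Notes on version B (the rewrite author's own statement) =====
-- stated objective: alternative
-- what changed: Inverts the scan: A translates the elf by every direction offset and probes the elves collection with early return; B builds the set of offsets once and iterates over the elves, testing each elf's displacement from the given elf for membership in that offset set.
import Mathlib
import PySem

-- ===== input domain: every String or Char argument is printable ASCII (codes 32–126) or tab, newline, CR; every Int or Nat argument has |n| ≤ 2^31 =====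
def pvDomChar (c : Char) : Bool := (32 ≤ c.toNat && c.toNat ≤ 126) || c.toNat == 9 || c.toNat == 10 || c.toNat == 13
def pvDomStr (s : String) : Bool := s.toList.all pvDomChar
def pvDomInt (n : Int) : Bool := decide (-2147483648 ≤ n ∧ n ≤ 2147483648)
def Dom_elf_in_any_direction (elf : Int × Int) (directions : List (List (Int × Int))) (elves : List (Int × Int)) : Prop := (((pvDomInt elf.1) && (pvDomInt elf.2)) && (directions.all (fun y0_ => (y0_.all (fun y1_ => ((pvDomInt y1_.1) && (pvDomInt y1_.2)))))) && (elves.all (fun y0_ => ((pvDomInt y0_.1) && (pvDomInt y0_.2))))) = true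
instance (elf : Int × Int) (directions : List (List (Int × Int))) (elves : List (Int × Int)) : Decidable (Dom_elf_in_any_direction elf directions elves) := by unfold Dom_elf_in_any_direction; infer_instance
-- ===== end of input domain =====

-- B inverts A's scan: instead of translating the elf by each offset and probing elves, B builds
-- the set of direction offsets once and scans the elves, testing each displacement (alternative).

-- ===== PORT A =====
def get_new_elf_pos (elf : Int × Int) (direction : Int × Int) : Int × Int :=
  (elf.1 + direction.1, elf.2 + direction.2)

-- inner 'for direction in cardinal_directions' loop: threads seen_directions, Bool = early 'return True'
def pvInnerA (elf : Int × Int) (elves : List (Int × Int)) :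
    List (Int × Int) → PySem.Set (Int × Int) → PySem.Set (Int × Int) × Bool
  | [], seen => (seen, false)
  | d :: ds, seen =>
    if PySem.Set.contains seen d then pvInnerA elf elves ds seen
    else
      let seen' := PySem.Set.add seen d
      if decide (get_new_elf_pos elf d ∈ elves) then (seen', true)
      else pvInnerA elf elves ds seen'

-- outer 'for cardinal_directions in directions' loop
def pvOuterA (elf : Int × Int) (elves : List (Int × Int)) :
    List (List (Int × Int)) → PySem.Set (Int × Int) → Bool
  | [], _ => false
  | g :: gs, seen =>
    let r := pvInnerA elf elves g seen
    if r.2 then true else pvOuterA elf elves gs r.1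

def elf_in_any_direction (elf : Int × Int) (directions : List (List (Int × Int))) (elves : List (Int × Int)) : Bool :=
  pvOuterA elf elves directions PySem.Set.empty

-- ===== PORT B =====
def elf_in_any_direction_alt (elf : Int × Int) (directions : List (List (Int × Int))) (elves : List (Int × Int)) : Bool :=
  let offsets : PySem.Set (Int × Int) := PySem.Set.ofList (directions.flatMap (fun g => g))
  elves.any (fun e => PySem.Set.contains offsets (e.1 - elf.1, e.2 - elf.2))

-- ===== PRECONDITION & SPEC =====
def Spec_elf_in_any_direction (elf : Int × Int) (directions : List (List (Int × Int))) (elves : List (Int × Int)) (out : Bool) : Prop := out = elf_in_any_direction_alt elf directions elves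
instance (elf : Int × Int) (directions : List (List (Int × Int))) (elves : List (Int × Int)) (out : Bool) : Decidable (Spec_elf_in_any_direction elf directions elves out) := by unfold Spec_elf_in_any_direction; infer_instance

-- ===== CLAIM (what is proved, stated in full; the proofs are below) =====
def Claim_equal_elf_in_any_direction : Prop := ∀ (elf : Int × Int) (directions : List (List (Int × Int))) (elves : List (Int × Int)), Dom_elf_in_any_direction elf directions elves → Spec_elf_in_any_direction elf directions elves (elf_in_any_direction elf directions elves)

-- ===== LEMMAS AND PROOFS =====

-- inner loop: under the invariant that no seen direction hits an elf, the Bool is the ∃ over the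
-- group, and when it is false the invariant carries over to the updated seen set
theorem pvInnerA_char (elf : Int × Int) (elves : List (Int × Int)) :
    ∀ (g : List (Int × Int)) (seen : PySem.Set (Int × Int)),
      (∀ d ∈ seen, get_new_elf_pos elf d ∉ elves) →
      ((pvInnerA elf elves g seen).2 = true ↔ ∃ d ∈ g, get_new_elf_pos elf d ∈ elves) ∧
      ((pvInnerA elf elves g seen).2 = false →
        ∀ d ∈ (pvInnerA elf elves g seen).1, get_new_elf_pos elf d ∉ elves) := by
  intro g
  induction g with
  | nil =>
    intro seen hinv
    exact ⟨by simp [pvInnerA], fun _ d hd => hinv d hd⟩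
  | cons d ds ih =>
    intro seen hinv
    by_cases hseen : d ∈ seen
    · have hmiss : get_new_elf_pos elf d ∉ elves := hinv d hseen
      have heq : pvInnerA elf elves (d :: ds) seen = pvInnerA elf elves ds seen := by
        simp [pvInnerA, hseen]
      rw [heq]
      obtain ⟨h1, h2⟩ := ih seen hinv
      refine ⟨?_, h2⟩
      rw [h1]
      constructor
      · rintro ⟨x, hx, hxe⟩; exact ⟨x, List.mem_cons_of_mem _ hx, hxe⟩
      · rintro ⟨x, hx, hxe⟩
        rcases List.mem_cons.mp hx with rfl | hx'
        · exact absurd hxe hmiss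
        · exact ⟨x, hx', hxe⟩
    · by_cases hhit : get_new_elf_pos elf d ∈ elves
      · have heq : pvInnerA elf elves (d :: ds) seen = (PySem.Set.add seen d, true) := by
          simp [pvInnerA, hseen, hhit]
        rw [heq]
        refine ⟨?_, fun h => Bool.noConfusion h⟩
        simp only [true_iff]
        exact ⟨d, List.mem_cons_self .., hhit⟩
      · have hinv' : ∀ x ∈ PySem.Set.add seen d, get_new_elf_pos elf x ∉ elves := by
          intro x hx
          rcases (PySem.Set.mem_add seen d x).mp hx with hx' | rfl
          · exact hinv x hx'
          · exact hhit
        have heq : pvInnerA elf elves (d :: ds) seen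
            = pvInnerA elf elves ds (PySem.Set.add seen d) := by
          simp [pvInnerA, hseen, hhit]
        rw [heq]
        obtain ⟨h1, h2⟩ := ih (PySem.Set.add seen d) hinv'
        refine ⟨?_, h2⟩
        rw [h1]
        constructor
        · rintro ⟨x, hx, hxe⟩; exact ⟨x, List.mem_cons_of_mem _ hx, hxe⟩
        · rintro ⟨x, hx, hxe⟩
          rcases List.mem_cons.mp hx with rfl | hx'
          · exact absurd hxe hhit
          · exact ⟨x, hx', hxe⟩

-- outer loop: under the invariant, the result is the ∃ over the flattened direction groups
theorem pvOuterA_char (elf : Int × Int) (elves : List (Int × Int)) :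
    ∀ (gs : List (List (Int × Int))) (seen : PySem.Set (Int × Int)),
      (∀ d ∈ seen, get_new_elf_pos elf d ∉ elves) →
      (pvOuterA elf elves gs seen = true ↔
        ∃ d ∈ gs.flatMap (fun g => g), get_new_elf_pos elf d ∈ elves) := by
  intro gs
  induction gs with
  | nil => intro seen hinv; simp [pvOuterA]
  | cons g gs ih =>
    intro seen hinv
    obtain ⟨hin1, hin2⟩ := pvInnerA_char elf elves g seen hinv
    by_cases hb : (pvInnerA elf elves g seen).2 = true
    · have heq : pvOuterA elf elves (g :: gs) seen = true := by
        simp [pvOuterA, hb]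
      rw [heq]
      simp only [true_iff, List.flatMap_cons, List.mem_append]
      rcases hin1.mp hb with ⟨x, hx, hxe⟩
      exact ⟨x, Or.inl hx, hxe⟩
    · have hb' : (pvInnerA elf elves g seen).2 = false := by
        cases h : (pvInnerA elf elves g seen).2 <;> simp_all
      have heq : pvOuterA elf elves (g :: gs) seen
          = pvOuterA elf elves gs (pvInnerA elf elves g seen).1 := by
        simp [pvOuterA, hb']
      rw [heq, ih (pvInnerA elf elves g seen).1 (hin2 hb')]
      simp only [List.flatMap_cons, List.mem_append]
      constructor
      · rintro ⟨x, hx, hxe⟩; exact ⟨x, Or.inr hx, hxe⟩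
      · rintro ⟨x, hx, hxe⟩
        rcases hx with hx | hx
        · exact absurd (hin1.mpr ⟨x, hx, hxe⟩) hb
        · exact ⟨x, hx, hxe⟩

-- B's inverted scan computes the same ∃: an elf e whose displacement e - elf is among the
-- offsets is exactly a hit elf + d ∈ elves for some offset d in the flattened groups
theorem alt_char (elf : Int × Int) (directions : List (List (Int × Int))) (elves : List (Int × Int)) :
    (elf_in_any_direction_alt elf directions elves = true ↔
      ∃ d ∈ directions.flatMap (fun g => g), get_new_elf_pos elf d ∈ elves) := by
  unfold elf_in_any_direction_alt
  simp only [List.any_eq_true, PySem.Set.contains_iff, PySem.Set.mem_ofList]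
  constructor
  · rintro ⟨e, he, hd⟩
    refine ⟨(e.1 - elf.1, e.2 - elf.2), hd, ?_⟩
    have : get_new_elf_pos elf (e.1 - elf.1, e.2 - elf.2) = e := by
      obtain ⟨a, b⟩ := e
      simp only [get_new_elf_pos, Prod.mk.injEq]
      constructor <;> ring
    rwa [this]
  · rintro ⟨d, hd, hde⟩
    refine ⟨get_new_elf_pos elf d, hde, ?_⟩
    have : ((get_new_elf_pos elf d).1 - elf.1, (get_new_elf_pos elf d).2 - elf.2) = d := by
      obtain ⟨a, b⟩ := d
      simp only [get_new_elf_pos, Prod.mk.injEq]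
      constructor <;> ring
    rwa [this]

-- ===== VERDICT (by name: the statement is the Claim_ definition above) =====
theorem elf_in_any_direction_spec : Claim_equal_elf_in_any_direction := by
  intro elf directions elves _
  unfold Spec_elf_in_any_direction elf_in_any_direction
  have hA := pvOuterA_char elf elves directions PySem.Set.empty (by simp [PySem.Set.empty])
  have hB := alt_char elf directions elves
  cases hA2 : pvOuterA elf elves directions PySem.Set.empty
  · cases hB2 : elf_in_any_direction_alt elf directions elves
    · rfl
    · exfalso
      have h := hA.mpr (hB.mp hB2)
      rw [hA2] at h
      exact Bool.noConfusion h
  · exact (hB.mpr (hA.mp hA2)).symm
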